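-- pv_equiv track=rewrite | github.com/YallaPapi/snowflake | src/scene_engine/integration/master_service.py | _route_matches
-- ===== SOURCE A (Python) =====
-- def _route_matches(route_pattern: str, actual_path: str) -> bool:
--     """Check if route pattern matches actual path"""
--     pattern_parts = route_pattern.split('/')
--     path_parts = actual_path.split('/')
--
--     if len(pattern_parts) != len(path_parts):
--         return False
--
--     for pattern_part, path_part in zip(pattern_parts, path_parts):
--         if pattern_part.startswith('{') and pattern_part.endswith('}'):
--             continue  # Parameter match
--         elif pattern_part != path_part:
--             return False
--
--     return True
-- ===== SOURCE B (Python) =====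
-- def _route_matches(route_pattern: str, actual_path: str) -> bool:
--     def go(ps, qs):
--         if not ps:
--             return not qs
--         if not qs:
--             return False
--         p = ps[0]
--         if not (p.startswith('{') and p.endswith('}')) and p != qs[0]:
--             return False
--         return go(ps[1:], qs[1:])
--     return go(route_pattern.split('/'), actual_path.split('/'))
-- ===== Notes on version B (the rewrite author's own statement) =====
-- stated objective: alternative
-- what changed: Replaces A's up-front length check plus zip loop with a single recursive simultaneous descent over both segment lists, detecting length mismatch at the base cases.
import Mathlib
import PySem

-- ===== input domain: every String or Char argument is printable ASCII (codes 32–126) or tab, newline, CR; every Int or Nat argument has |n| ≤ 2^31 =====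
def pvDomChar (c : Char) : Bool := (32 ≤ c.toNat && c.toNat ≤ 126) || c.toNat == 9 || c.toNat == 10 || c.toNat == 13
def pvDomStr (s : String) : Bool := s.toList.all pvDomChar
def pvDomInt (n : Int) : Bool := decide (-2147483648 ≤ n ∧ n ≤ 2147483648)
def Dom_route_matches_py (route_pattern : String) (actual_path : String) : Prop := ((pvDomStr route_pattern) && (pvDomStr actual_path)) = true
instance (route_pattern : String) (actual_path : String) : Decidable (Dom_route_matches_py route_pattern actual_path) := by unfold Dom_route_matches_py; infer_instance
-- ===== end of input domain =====

-- B replaces A's up-front length check plus zip loop by a recursive simultaneous descent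
-- over both segment lists (alternative decomposition, same cost).

-- ===== PORT A =====
-- A's for-loop over zip(pattern_parts, path_parts)
def routeALoop : List (String × String) → Bool
  | [] => true
  | (p, q) :: rest =>
    if PySem.Str.startswith p "{" && PySem.Str.endswith p "}" then routeALoop rest
    else if p ≠ q then false
    else routeALoop rest

def route_matches_py (route_pattern : String) (actual_path : String) : Bool :=
  let pattern_parts := (PySem.Str.split? route_pattern "/").getD []
  let path_parts := (PySem.Str.split? actual_path "/").getD []
  if pattern_parts.length ≠ path_parts.length then false
  else routeALoop (pattern_parts.zip path_parts)

-- ===== PORT B =====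
-- B's recursive helper go(ps, qs)
def routeBGo : List String → List String → Bool
  | [], qs => qs.isEmpty
  | _ :: _, [] => false
  | p :: ps, q :: qs =>
    if !(PySem.Str.startswith p "{" && PySem.Str.endswith p "}") && p ≠ q then false
    else routeBGo ps qs

def route_matches_py_alt (route_pattern : String) (actual_path : String) : Bool :=
  routeBGo ((PySem.Str.split? route_pattern "/").getD []) ((PySem.Str.split? actual_path "/").getD [])

-- ===== PRECONDITION & SPEC =====
def Spec_route_matches_py (route_pattern : String) (actual_path : String) (out : Bool) : Prop := out = route_matches_py_alt route_pattern actual_path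
instance (route_pattern : String) (actual_path : String) (out : Bool) : Decidable (Spec_route_matches_py route_pattern actual_path out) := by unfold Spec_route_matches_py; infer_instance

-- ===== CLAIM (what is proved, stated in full; the proofs are below) =====
def Claim_equal_route_matches_py : Prop := ∀ (route_pattern : String) (actual_path : String), Dom_route_matches_py route_pattern actual_path → Spec_route_matches_py route_pattern actual_path (route_matches_py route_pattern actual_path)

-- ===== LEMMAS AND PROOFS =====
lemma routeA_eq_routeB : ∀ (ps qs : List String),
    (if ps.length ≠ qs.length then false else routeALoop (ps.zip qs)) = routeBGo ps qs := by
  intro ps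
  induction ps with
  | nil =>
    intro qs
    cases qs <;> simp [routeALoop, routeBGo]
  | cons p ps ih =>
    intro qs
    cases qs with
    | nil => simp [routeBGo]
    | cons q qs =>
      have h := ih qs
      by_cases hlen : ps.length = qs.length
      · simp only [List.length_cons, hlen, ne_eq, not_true_eq_false, if_false,
          List.zip_cons_cons, routeALoop, routeBGo]
        by_cases hw : (PySem.Str.startswith p "{" && PySem.Str.endswith p "}") = true
        · simp only [hw, if_true, Bool.not_true, Bool.false_and, Bool.false_eq_true, if_false]
          simpa [hlen] using h
        · simp only [hw, Bool.not_eq_true] at *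
          simp only [Bool.not_false, Bool.true_and]
          by_cases hpq : p = q
          · simp only [hpq, not_true_eq_false, if_false, decide_false, Bool.false_eq_true,
              if_false]
            simpa [hlen] using h
          · simp [hpq]
      · have h2 : routeBGo ps qs = false := by
          simp only [hlen, ne_eq, not_false_eq_true, if_true] at h
          exact h.symm
        simp [routeBGo, hlen, h2]

theorem route_matches_py_spec : Claim_equal_route_matches_py := by
  intro rp ap _
  unfold Spec_route_matches_py route_matches_py route_matches_py_alt
  exact routeA_eq_routeB _ _
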